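-- pv_equiv track=rewrite | github.com/vamsi-1111/CodePath | Week_3_Session_2/w3s2v2.py | first_symmetrical_landmark
-- ===== SOURCE A (Python) =====
-- def first_symmetrical_landmark(landmarks):
--
--     res = []
--     for landmark in landmarks:
--         ptr1 = 0
--         ptr2 = len(landmark) - 1
--         if len(landmark) % 2 == 0:
--             while ptr1 < ptr2:
--                 if landmark[ptr1] == landmark[ptr2]:
--                     ptr1 = ptr1 + 1
--                     ptr2 = ptr2 - 1
--                 elif landmark[ptr1] != landmark[ptr2]:
--                     break
--             if ptr1 > ptr2:
--                 res.append(landmark)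
--         elif len(landmark) % 2 == 1:
--             while ptr1 != ptr2:
--                 if landmark[ptr1] == landmark[ptr2]:
--                     ptr1 = ptr1 + 1
--                     ptr2 = ptr2 - 1
--                 elif landmark[ptr1] != landmark[ptr2]:
--                     break
--             if ptr1 == ptr2:
--                 res.append(landmark)
--     return res
-- ===== SOURCE B (Python) =====
-- def first_symmetrical_landmark(landmarks):
--     return [l for l in landmarks if l == l[::-1]]
-- ===== Notes on version B (the rewrite author's own statement) =====
-- stated objective: idiomatic
-- what changed: Replaces the manual two-pointer inward scan with even/odd length branching by building a reversed copy with slicing and comparing it for equality; no pointer state and no parity cases.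
import Mathlib
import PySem

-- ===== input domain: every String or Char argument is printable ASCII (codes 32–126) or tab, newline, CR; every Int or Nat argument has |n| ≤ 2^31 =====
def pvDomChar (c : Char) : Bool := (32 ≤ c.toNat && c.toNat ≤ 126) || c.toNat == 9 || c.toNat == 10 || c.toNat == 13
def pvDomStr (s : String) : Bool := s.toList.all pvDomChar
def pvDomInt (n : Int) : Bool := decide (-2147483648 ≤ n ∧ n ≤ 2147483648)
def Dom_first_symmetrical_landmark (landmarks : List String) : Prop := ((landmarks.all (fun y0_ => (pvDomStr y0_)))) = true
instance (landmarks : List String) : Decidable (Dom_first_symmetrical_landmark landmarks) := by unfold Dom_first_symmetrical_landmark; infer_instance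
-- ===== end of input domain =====

-- B replaces A's manual two-pointer scan with even/odd branching by comparing each string to its reversed copy (idiomatic; same cost).


-- ===== PORT A =====

-- needed by the odd loop's termination argument
theorem pvIdx_lt_of_pyGet?_some {α : Type} {xs : List α} {i : Int} {a : α}
    (h : PySem.List.pyGet? xs i = some a) : i < (xs.length : Int) := by
  by_contra hlt
  have : PySem.List.pyGet? xs i = none := by
    rw [PySem.List.pyGet?_eq_none_iff]
    simp only [PySem.Raise.InRange]
    omega
  simp [this] at h

-- the even-length while loop 'while ptr1 < ptr2: …' (step for step; the wildcard
-- match arm corresponds to an IndexError, unreachable at the call site)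
def pvLoopEven (cs : List Char) (p1 p2 : Int) : Int × Int :=
  if _h : p1 < p2 then
    match PySem.List.pyGet? cs p1, PySem.List.pyGet? cs p2 with
    | some a, some b => if a = b then pvLoopEven cs (p1 + 1) (p2 - 1) else (p1, p2)
    | _, _ => (p1, p2)
  else (p1, p2)
termination_by (p2 - p1).toNat
decreasing_by omega

-- the odd-length while loop 'while ptr1 != ptr2: …'
def pvLoopOdd (cs : List Char) (p1 p2 : Int) : Int × Int :=
  if _h : p1 ≠ p2 then
    match h1 : PySem.List.pyGet? cs p1, PySem.List.pyGet? cs p2 with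
    | some a, some b => if a = b then pvLoopOdd cs (p1 + 1) (p2 - 1) else (p1, p2)
    | _, _ => (p1, p2)
  else (p1, p2)
termination_by (cs.length - p1).toNat
decreasing_by
  have := pvIdx_lt_of_pyGet?_some h1
  omega

-- A's per-string body: parity branch, run the loop, test the final pointers
def pvCheckA (landmark : String) : Bool :=
  let cs := landmark.toList
  let p1 : Int := 0
  let p2 : Int := (cs.length : Int) - 1
  if (cs.length : Int) % 2 = 0 then
    let r := pvLoopEven cs p1 p2
    decide (r.1 > r.2)
  else if (cs.length : Int) % 2 = 1 then
    let r := pvLoopOdd cs p1 p2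
    decide (r.1 = r.2)
  else false

def first_symmetrical_landmark (landmarks : List String) : List String :=
  landmarks.foldl (fun res landmark => if pvCheckA landmark then res ++ [landmark] else res) []

-- ===== PORT B =====

-- 'l == l[::-1]' : the [::-1] slice is PySem.Str.slice? with step -1 (always some, step ≠ 0)
def first_symmetrical_landmark_alt (landmarks : List String) : List String :=
  landmarks.filter (fun l => PySem.Str.slice? l none none (-1) == some l)

-- ===== PRECONDITION & SPEC =====
def Spec_first_symmetrical_landmark (landmarks : List String) (out : List String) : Prop := out = first_symmetrical_landmark_alt landmarks
instance (landmarks : List String) (out : List String) : Decidable (Spec_first_symmetrical_landmark landmarks out) := by unfold Spec_first_symmetrical_landmark; infer_instance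

-- ===== CLAIM (what is proved, stated in full; the proofs are below) =====
def Claim_equal_first_symmetrical_landmark : Prop := ∀ (landmarks : List String), Dom_first_symmetrical_landmark landmarks → Spec_first_symmetrical_landmark landmarks (first_symmetrical_landmark landmarks)

-- ===== LEMMAS AND PROOFS =====

-- window condition: every mirror pair inside [i, j] matches
def pvWin (cs : List Char) (i j : Int) : Prop :=
  ∀ k : Int, i ≤ k → k ≤ j → PySem.List.pyGet? cs k = PySem.List.pyGet? cs ((cs.length : Int) - 1 - k)

theorem pvLoopEven_spec (cs : List Char) :
    ∀ (m : Nat) (i j : Int), (j - i).toNat = m → 0 ≤ i → i + j = (cs.length : Int) - 1 →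
      i ≤ j + 1 → (cs.length : Int) % 2 = 0 →
      ((pvLoopEven cs i j).1 > (pvLoopEven cs i j).2 ↔ pvWin cs i j) := by
  intro m
  induction m using Nat.strong_induction_on with
  | _ m IH =>
    intro i j hm h0 hij hc hpar
    rw [pvLoopEven]
    by_cases hlt : i < j
    · have hj : j < (cs.length : Int) := by omega
      have hi : i < (cs.length : Int) := by omega
      have hgi := PySem.List.pyGet?_eq_some_getElem (xs := cs) (i := i) h0 hi
      have hgj := PySem.List.pyGet?_eq_some_getElem (xs := cs) (i := j) (by omega) hj
      rw [dif_pos hlt, hgi, hgj]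
      simp only []
      by_cases heq : cs[i.toNat]'(by omega) = cs[j.toNat]'(by omega)
      · rw [if_pos heq]
        have hrec := IH ((j - 1) - (i + 1)).toNat (by omega) (i + 1) (j - 1) rfl
          (by omega) (by omega) (by omega) hpar
        rw [hrec]
        constructor
        · intro hw k hk1 hk2
          by_cases hki : k = i
          · subst hki
            have : (cs.length : Int) - 1 - k = j := by omega
            rw [this, hgi, hgj, heq]
          · by_cases hkj : k = j
            · subst hkj
              have : (cs.length : Int) - 1 - k = i := by omega
              rw [this, hgi, hgj, heq]
            · exact hw k (by omega) (by omega)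
        · intro hw k hk1 hk2
          exact hw k (by omega) (by omega)
      · rw [if_neg heq]
        constructor
        · intro h; exfalso; omega
        · intro hw
          exfalso
          have := hw i (le_refl i) (by omega)
          have hji : (cs.length : Int) - 1 - i = j := by omega
          rw [hji, hgi, hgj] at this
          exact heq (Option.some.inj this)
    · -- pointers crossed: i = j + 1 (i = j is impossible by parity)
      have hij' : i = j + 1 := by omega
      rw [dif_neg hlt]
      constructor
      · intro _ k hk1 hk2; exfalso; omega
      · intro _; simp only []; omega

theorem pvLoopOdd_spec (cs : List Char) :
    ∀ (m : Nat) (i j : Int), (j - i).toNat = m → 0 ≤ i → i + j = (cs.length : Int) - 1 →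
      i ≤ j → (cs.length : Int) % 2 = 1 →
      ((pvLoopOdd cs i j).1 = (pvLoopOdd cs i j).2 ↔ pvWin cs i j) := by
  intro m
  induction m using Nat.strong_induction_on with
  | _ m IH =>
    intro i j hm h0 hij hc hpar
    rw [pvLoopOdd]
    by_cases hne : i ≠ j
    · have hlt : i < j := by omega
      have hj : j < (cs.length : Int) := by omega
      have hi : i < (cs.length : Int) := by omega
      have hgi := PySem.List.pyGet?_eq_some_getElem (xs := cs) (i := i) h0 hi
      have hgj := PySem.List.pyGet?_eq_some_getElem (xs := cs) (i := j) (by omega) hj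
      rw [dif_pos hne, hgi, hgj]
      simp only []
      by_cases heq : cs[i.toNat]'(by omega) = cs[j.toNat]'(by omega)
      · rw [if_pos heq]
        have hrec := IH ((j - 1) - (i + 1)).toNat (by omega) (i + 1) (j - 1) rfl
          (by omega) (by omega) (by omega) hpar
        rw [hrec]
        constructor
        · intro hw k hk1 hk2
          by_cases hki : k = i
          · subst hki
            have : (cs.length : Int) - 1 - k = j := by omega
            rw [this, hgi, hgj, heq]
          · by_cases hkj : k = j
            · subst hkj
              have : (cs.length : Int) - 1 - k = i := by omega
              rw [this, hgi, hgj, heq]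
            · exact hw k (by omega) (by omega)
        · intro hw k hk1 hk2
          exact hw k (by omega) (by omega)
      · rw [if_neg heq]
        constructor
        · intro h; exfalso; omega
        · intro hw
          exfalso
          have := hw i (le_refl i) (by omega)
          have hji : (cs.length : Int) - 1 - i = j := by omega
          rw [hji, hgi, hgj] at this
          exact heq (Option.some.inj this)
    · -- i = j: the middle element pairs with itself
      rw [not_not] at hne
      subst hne
      rw [dif_neg (by omega)]
      constructor
      · intro _ k hk1 hk2
        have hk : k = i := by omega
        subst hk
        have : (cs.length : Int) - 1 - k = k := by omega
        rw [this]
      · intro _; rfl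

theorem pvWin_iff_reverse (cs : List Char) :
    pvWin cs 0 ((cs.length : Int) - 1) ↔ cs.reverse = cs := by
  constructor
  · intro hw
    apply List.ext_getElem (by simp)
    intro t ht1 ht2
    have hlt : t < cs.length := ht2
    have h1 := hw t (by omega) (by omega)
    have hi1 := PySem.List.pyGet?_eq_some_getElem (xs := cs) (i := (t : Int)) (by omega) (by omega)
    have hi2 := PySem.List.pyGet?_eq_some_getElem (xs := cs) (i := (cs.length : Int) - 1 - t) (by omega) (by omega)
    rw [hi1, hi2] at h1
    have h2 := Option.some.inj h1
    rw [List.getElem_reverse]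
    have he1 : ((t : Int)).toNat = t := by omega
    have he2 : ((cs.length : Int) - 1 - t).toNat = cs.length - 1 - t := by omega
    simp only [he1, he2] at h2
    exact h2.symm
  · intro hr k hk1 hk2
    have hk3 : k < (cs.length : Int) := by omega
    conv_lhs => rw [← hr]
    rw [PySem.List.pyGet?_eq_some_getElem (xs := cs.reverse) (i := k) hk1 (by simpa using hk3),
        PySem.List.pyGet?_eq_some_getElem (xs := cs) (i := (cs.length : Int) - 1 - k) (by omega) (by omega)]
    congr 1
    rw [List.getElem_reverse]
    congr 1
    omega

theorem pvCheckA_iff (l : String) : pvCheckA l = true ↔ l.toList.reverse = l.toList := by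
  unfold pvCheckA
  set cs := l.toList with hcs
  by_cases hpar : (cs.length : Int) % 2 = 0
  · rw [if_pos hpar]
    simp only [decide_eq_true_eq]
    rw [pvLoopEven_spec cs (((cs.length : Int) - 1) - 0).toNat 0 ((cs.length : Int) - 1) rfl
      (le_refl 0) (by omega) (by omega) hpar]
    exact pvWin_iff_reverse cs
  · have hpar1 : (cs.length : Int) % 2 = 1 := by omega
    rw [if_neg hpar, if_pos hpar1]
    simp only [decide_eq_true_eq]
    rw [pvLoopOdd_spec cs (((cs.length : Int) - 1) - 0).toNat 0 ((cs.length : Int) - 1) rfl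
      (le_refl 0) (by omega) (by omega) hpar1]
    exact pvWin_iff_reverse cs

theorem pvCheckB_iff (l : String) :
    (PySem.Str.slice? l none none (-1) == some l) = true ↔ l.toList.reverse = l.toList := by
  rw [PySem.Str.slice?_none_none_neg_one]
  simp only [beq_iff_eq, Option.some.injEq]
  constructor
  · intro h
    have := congrArg String.toList h
    simpa using this
  · intro h
    rw [h]
    simp

theorem pvFoldl_filter (p : String → Bool) (xs : List String) :
    ∀ acc, xs.foldl (fun res l => if p l then res ++ [l] else res) acc = acc ++ xs.filter p := by
  induction xs with
  | nil => intro acc; simp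
  | cons x xs ih =>
    intro acc
    by_cases hx : p x
    · simp [List.foldl, List.filter, hx, ih]
    · simp [List.foldl, List.filter, hx, ih]

-- ===== VERDICT (by name: the statement is the Claim_ definition above) =====
theorem first_symmetrical_landmark_spec : Claim_equal_first_symmetrical_landmark := by
  intro landmarks _
  unfold Spec_first_symmetrical_landmark first_symmetrical_landmark first_symmetrical_landmark_alt
  rw [pvFoldl_filter pvCheckA landmarks []]
  simp only [List.nil_append]
  apply List.filter_congr
  intro l _
  rw [Bool.eq_iff_iff, pvCheckA_iff, pvCheckB_iff]
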